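-- pv_equiv track=rewrite | github.com/AuNooAI/AunooAI | app/services/topic_map_service.py | _create_heuristic_topic_label
-- ===== SOURCE A (Python) =====
-- from typing import Dict, List, Any, Optional
--
-- def _create_heuristic_topic_label(top_words: List[str]) -> str:
--     """Create topic labels using simple heuristics."""
--     if not top_words:
--         return "Unnamed Topic"
--
--     if len(top_words) >= 2:
--         primary_word = top_words[0].title()
--         secondary_word = top_words[1].title()
--
--         # Domain-specific heuristics
--         if any(word in top_words for word in ['ai', 'artificial', 'intelligence', 'machine', 'learning']):
--             return f"AI & {secondary_word}"
--         elif any(word in top_words for word in ['market', 'business', 'economic', 'financial']):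
--             return f"Market {secondary_word}"
--         elif any(word in top_words for word in ['social', 'society', 'people', 'community']):
--             return f"Social {secondary_word}"
--         elif any(word in top_words for word in ['technology', 'tech', 'digital', 'software']):
--             return f"Tech {secondary_word}"
--         elif any(word in top_words for word in ['health', 'medical', 'healthcare', 'medicine']):
--             return f"Health {secondary_word}"
--         elif any(word in top_words for word in ['environment', 'climate', 'green', 'sustainability']):
--             return f"Environmental {secondary_word}"
--         elif any(word in top_words for word in ['policy', 'government', 'political', 'regulation']):
--             return f"Policy {secondary_word}"
--         else:
--             return f"{primary_word} & {secondary_word}"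
--     else:
--         return top_words[0].title()
-- ===== SOURCE B (Python) =====
-- _RULES = [
--     ['ai', 'artificial', 'intelligence', 'machine', 'learning'],
--     ['market', 'business', 'economic', 'financial'],
--     ['social', 'society', 'people', 'community'],
--     ['technology', 'tech', 'digital', 'software'],
--     ['health', 'medical', 'healthcare', 'medicine'],
--     ['environment', 'climate', 'green', 'sustainability'],
--     ['policy', 'government', 'political', 'regulation'],
-- ]
-- _PREFIXES = ["AI & ", "Market ", "Social ", "Tech ", "Health ", "Environmental ", "Policy "]
--
--
-- def _priority(word):
--     for i, kws in enumerate(_RULES):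
--         if word in kws:
--             return i
--     return None
--
--
-- def _create_heuristic_topic_label(top_words):
--     """Create topic labels using simple heuristics."""
--     if not top_words:
--         return "Unnamed Topic"
--     if len(top_words) < 2:
--         return top_words[0].title()
--     secondary = top_words[1].title()
--     hits = [p for p in map(_priority, top_words) if p is not None]
--     if hits:
--         return _PREFIXES[min(hits)] + secondary
--     return top_words[0].title() + " & " + secondary
-- ===== Notes on version B (the rewrite author's own statement) =====
-- stated objective: alternative
-- what changed: Replaces A's seven-branch if/elif cascade (each branch scanning top_words per keyword) with a single pass that maps every word to a rule priority via a rules table and labels by the minimum priority found.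
import Mathlib
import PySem

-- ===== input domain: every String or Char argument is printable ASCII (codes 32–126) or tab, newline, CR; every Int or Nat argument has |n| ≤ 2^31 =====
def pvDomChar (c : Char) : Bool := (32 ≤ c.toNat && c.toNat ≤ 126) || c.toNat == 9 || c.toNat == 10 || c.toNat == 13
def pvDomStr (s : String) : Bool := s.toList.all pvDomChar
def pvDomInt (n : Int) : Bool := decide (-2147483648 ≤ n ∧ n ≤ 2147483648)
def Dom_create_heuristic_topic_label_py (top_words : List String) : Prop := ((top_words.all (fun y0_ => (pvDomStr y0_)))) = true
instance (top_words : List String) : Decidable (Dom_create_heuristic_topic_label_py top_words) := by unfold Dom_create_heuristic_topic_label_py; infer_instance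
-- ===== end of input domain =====

-- B replaces A's per-rule if/elif scans by a single pass mapping each word to a rule
-- priority and taking the minimum; objective: alternative structure, same cost.

-- str.title(), hand-ported (no PySem primitive): exact on the ASCII domain, where
-- Python's "cased" characters are exactly the letters.
def pvTitleChars : List Char → Bool → List Char
  | [], _ => []
  | c :: cs, prev =>
    if PySem.Chars.isalpha c then
      (if prev then PySem.Chars.lowerChar c else PySem.Chars.upperChar c) :: pvTitleChars cs true
    else
      c :: pvTitleChars cs false

def pvTitle (s : String) : String := String.ofList (pvTitleChars s.toList false)

-- ===== PORT A =====
def create_heuristic_topic_label_py (top_words : List String) : String :=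
  match top_words with
  | [] => "Unnamed Topic"
  | [w] => pvTitle w
  | w0 :: w1 :: _ =>
    let primary_word := pvTitle w0
    let secondary_word := pvTitle w1
    if (["ai", "artificial", "intelligence", "machine", "learning"].any
        (fun w => top_words.contains w)) then "AI & " ++ secondary_word
    else if (["market", "business", "economic", "financial"].any
        (fun w => top_words.contains w)) then "Market " ++ secondary_word
    else if (["social", "society", "people", "community"].any
        (fun w => top_words.contains w)) then "Social " ++ secondary_word
    else if (["technology", "tech", "digital", "software"].any
        (fun w => top_words.contains w)) then "Tech " ++ secondary_word
    else if (["health", "medical", "healthcare", "medicine"].any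
        (fun w => top_words.contains w)) then "Health " ++ secondary_word
    else if (["environment", "climate", "green", "sustainability"].any
        (fun w => top_words.contains w)) then "Environmental " ++ secondary_word
    else if (["policy", "government", "political", "regulation"].any
        (fun w => top_words.contains w)) then "Policy " ++ secondary_word
    else primary_word ++ " & " ++ secondary_word

-- ===== PORT B =====
def pvRules : List (List String) :=
  [["ai", "artificial", "intelligence", "machine", "learning"],
   ["market", "business", "economic", "financial"],
   ["social", "society", "people", "community"],
   ["technology", "tech", "digital", "software"],
   ["health", "medical", "healthcare", "medicine"],
   ["environment", "climate", "green", "sustainability"],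
   ["policy", "government", "political", "regulation"]]

def pvPrefixes : List String :=
  ["AI & ", "Market ", "Social ", "Tech ", "Health ", "Environmental ", "Policy "]

def pvPriorityAux (w : String) : List (List String) → Nat → Option Nat
  | [], _ => none
  | kws :: rest, i => if w ∈ kws then some i else pvPriorityAux w rest (i + 1)

def pvPriority (w : String) : Option Nat := pvPriorityAux w pvRules 0

def create_heuristic_topic_label_py_alt (top_words : List String) : String :=
  match top_words with
  | [] => "Unnamed Topic"
  | [w] => pvTitle w
  | w0 :: w1 :: rest =>
    let secondary := pvTitle w1
    let hits := (w0 :: w1 :: rest).filterMap pvPriority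
    match PySem.List.min? hits (fun x => x) with
    | some i => (pvPrefixes.getD i "") ++ secondary  -- i < 7 always, so getD is _PREFIXES[i]
    | none => pvTitle w0 ++ " & " ++ secondary

-- ===== PRECONDITION & SPEC =====
def Spec_create_heuristic_topic_label_py (top_words : List String) (out : String) : Prop := out = create_heuristic_topic_label_py_alt top_words
instance (top_words : List String) (out : String) : Decidable (Spec_create_heuristic_topic_label_py top_words out) := by unfold Spec_create_heuristic_topic_label_py; infer_instance

-- ===== CLAIM (what is proved, stated in full; the proofs are below) =====
def Claim_equal_create_heuristic_topic_label_py : Prop := ∀ (top_words : List String), Dom_create_heuristic_topic_label_py top_words → Spec_create_heuristic_topic_label_py top_words (create_heuristic_topic_label_py top_words)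

-- ===== LEMMAS AND PROOFS =====

-- pvPriority unfolded to the nested conditional over the seven literal keyword lists
theorem pvPriority_eq (w : String) :
    pvPriority w =
      if w ∈ pvRules.getD 0 [] then some 0
      else if w ∈ pvRules.getD 1 [] then some 1
      else if w ∈ pvRules.getD 2 [] then some 2
      else if w ∈ pvRules.getD 3 [] then some 3
      else if w ∈ pvRules.getD 4 [] then some 4
      else if w ∈ pvRules.getD 5 [] then some 5
      else if w ∈ pvRules.getD 6 [] then some 6
      else none := by
  simp [pvPriority, pvRules, pvPriorityAux]

theorem pvPriority_some (w : String) (i : Nat) (h : pvPriority w = some i) :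
    i < 7 ∧ w ∈ pvRules.getD i [] := by
  rw [pvPriority_eq] at h
  split_ifs at h with h0 h1 h2 h3 h4 h5 h6
  all_goals (cases h; exact ⟨by omega, by assumption⟩)

theorem pvPriority_of_mem (w : String) (i : Nat) (hi : i < 7)
    (hmem : w ∈ pvRules.getD i []) (hnone : ∀ j, j < i → w ∉ pvRules.getD j []) :
    pvPriority w = some i := by
  rw [pvPriority_eq]
  interval_cases i <;> simp_all

theorem min?_id_unique (hits : List Nat) (i : Nat) (hmem : i ∈ hits)
    (hlb : ∀ m ∈ hits, i ≤ m) : PySem.List.min? hits (fun x => x) = some i := by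
  cases e : PySem.List.min? hits (fun x => x) with
  | none =>
      rw [PySem.List.min?_eq_none_iff] at e
      subst e; simp at hmem
  | some m =>
      have h1 : m ∈ hits := PySem.List.min?_mem e
      have h2 : m ≤ i := by simpa using PySem.List.min?_isMin e i hmem
      have h3 : i ≤ m := hlb m h1
      have : m = i := le_antisymm h2 h3
      simp [this]

theorem hits_mem_any (tw : List String) (m : Nat) (h : m ∈ tw.filterMap pvPriority) :
    m < 7 ∧ ((pvRules.getD m []).any (fun k => tw.contains k)) = true := by
  rcases List.mem_filterMap.mp h with ⟨w, hw, hp⟩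
  obtain ⟨h7, hr⟩ := pvPriority_some w m hp
  refine ⟨h7, List.any_eq_true.mpr ⟨w, hr, by simpa using hw⟩⟩

theorem any_mem_hits (tw : List String) (i : Nat) (hi : i < 7)
    (h : ((pvRules.getD i []).any (fun k => tw.contains k)) = true)
    (hlow : ∀ j, j < i → ((pvRules.getD j []).any (fun k => tw.contains k)) = false) :
    i ∈ tw.filterMap pvPriority := by
  rcases List.any_eq_true.mp h with ⟨k, hk, hkt⟩
  refine List.mem_filterMap.mpr ⟨k, by simpa using hkt, ?_⟩
  apply pvPriority_of_mem k i hi hk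
  intro j hj hkj
  have hf := hlow j hj
  rw [List.any_eq_false] at hf
  exact (hf k hkj) hkt

-- ===== VERDICT (by name: the statement is the Claim_ definition above) =====
theorem create_heuristic_topic_label_py_spec : Claim_equal_create_heuristic_topic_label_py := by
  intro tw _
  unfold Spec_create_heuristic_topic_label_py
  match tw with
  | [] => rfl
  | [w] => rfl
  | w0 :: w1 :: rest =>
    simp only [create_heuristic_topic_label_py, create_heuristic_topic_label_py_alt]
    by_cases h0 : ((["ai", "artificial", "intelligence", "machine", "learning"] : List String).any (fun w => (w0 :: w1 :: rest).contains w)) = true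
    · have hm := any_mem_hits (w0 :: w1 :: rest) 0 (by omega) h0
        (fun j hj => absurd hj (by omega))
      have hmin := min?_id_unique _ 0 hm (fun m hm' => by
        obtain ⟨h7, hany⟩ := hits_mem_any (w0 :: w1 :: rest) m hm'
        interval_cases m <;> first | omega )
      rw [if_pos h0, hmin]
      rfl
    · by_cases h1 : ((["market", "business", "economic", "financial"] : List String).any (fun w => (w0 :: w1 :: rest).contains w)) = true
      · have hm := any_mem_hits (w0 :: w1 :: rest) 1 (by omega) h1
          (fun j hj => by interval_cases j <;> first | exact Bool.eq_false_iff.mpr h0)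
        have hmin := min?_id_unique _ 1 hm (fun m hm' => by
          obtain ⟨h7, hany⟩ := hits_mem_any (w0 :: w1 :: rest) m hm'
          interval_cases m <;> first | omega | exact absurd hany h0)
        rw [if_neg h0, if_pos h1, hmin]
        rfl
      · by_cases h2 : ((["social", "society", "people", "community"] : List String).any (fun w => (w0 :: w1 :: rest).contains w)) = true
        · have hm := any_mem_hits (w0 :: w1 :: rest) 2 (by omega) h2
            (fun j hj => by interval_cases j <;> first | exact Bool.eq_false_iff.mpr h0 | exact Bool.eq_false_iff.mpr h1)
          have hmin := min?_id_unique _ 2 hm (fun m hm' => by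
            obtain ⟨h7, hany⟩ := hits_mem_any (w0 :: w1 :: rest) m hm'
            interval_cases m <;> first | omega | exact absurd hany h0 | exact absurd hany h1)
          rw [if_neg h0, if_neg h1, if_pos h2, hmin]
          rfl
        · by_cases h3 : ((["technology", "tech", "digital", "software"] : List String).any (fun w => (w0 :: w1 :: rest).contains w)) = true
          · have hm := any_mem_hits (w0 :: w1 :: rest) 3 (by omega) h3
              (fun j hj => by interval_cases j <;> first | exact Bool.eq_false_iff.mpr h0 | exact Bool.eq_false_iff.mpr h1 | exact Bool.eq_false_iff.mpr h2)
            have hmin := min?_id_unique _ 3 hm (fun m hm' => by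
              obtain ⟨h7, hany⟩ := hits_mem_any (w0 :: w1 :: rest) m hm'
              interval_cases m <;> first | omega | exact absurd hany h0 | exact absurd hany h1 | exact absurd hany h2)
            rw [if_neg h0, if_neg h1, if_neg h2, if_pos h3, hmin]
            rfl
          · by_cases h4 : ((["health", "medical", "healthcare", "medicine"] : List String).any (fun w => (w0 :: w1 :: rest).contains w)) = true
            · have hm := any_mem_hits (w0 :: w1 :: rest) 4 (by omega) h4
                (fun j hj => by interval_cases j <;> first | exact Bool.eq_false_iff.mpr h0 | exact Bool.eq_false_iff.mpr h1 | exact Bool.eq_false_iff.mpr h2 | exact Bool.eq_false_iff.mpr h3)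
              have hmin := min?_id_unique _ 4 hm (fun m hm' => by
                obtain ⟨h7, hany⟩ := hits_mem_any (w0 :: w1 :: rest) m hm'
                interval_cases m <;> first | omega | exact absurd hany h0 | exact absurd hany h1 | exact absurd hany h2 | exact absurd hany h3)
              rw [if_neg h0, if_neg h1, if_neg h2, if_neg h3, if_pos h4, hmin]
              rfl
            · by_cases h5 : ((["environment", "climate", "green", "sustainability"] : List String).any (fun w => (w0 :: w1 :: rest).contains w)) = true
              · have hm := any_mem_hits (w0 :: w1 :: rest) 5 (by omega) h5
                  (fun j hj => by interval_cases j <;> first | exact Bool.eq_false_iff.mpr h0 | exact Bool.eq_false_iff.mpr h1 | exact Bool.eq_false_iff.mpr h2 | exact Bool.eq_false_iff.mpr h3 | exact Bool.eq_false_iff.mpr h4)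
                have hmin := min?_id_unique _ 5 hm (fun m hm' => by
                  obtain ⟨h7, hany⟩ := hits_mem_any (w0 :: w1 :: rest) m hm'
                  interval_cases m <;> first | omega | exact absurd hany h0 | exact absurd hany h1 | exact absurd hany h2 | exact absurd hany h3 | exact absurd hany h4)
                rw [if_neg h0, if_neg h1, if_neg h2, if_neg h3, if_neg h4, if_pos h5, hmin]
                rfl
              · by_cases h6 : ((["policy", "government", "political", "regulation"] : List String).any (fun w => (w0 :: w1 :: rest).contains w)) = true
                · have hm := any_mem_hits (w0 :: w1 :: rest) 6 (by omega) h6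
                    (fun j hj => by interval_cases j <;> first | exact Bool.eq_false_iff.mpr h0 | exact Bool.eq_false_iff.mpr h1 | exact Bool.eq_false_iff.mpr h2 | exact Bool.eq_false_iff.mpr h3 | exact Bool.eq_false_iff.mpr h4 | exact Bool.eq_false_iff.mpr h5)
                  have hmin := min?_id_unique _ 6 hm (fun m hm' => by
                    obtain ⟨h7, hany⟩ := hits_mem_any (w0 :: w1 :: rest) m hm'
                    interval_cases m <;> first | omega | exact absurd hany h0 | exact absurd hany h1 | exact absurd hany h2 | exact absurd hany h3 | exact absurd hany h4 | exact absurd hany h5)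
                  rw [if_neg h0, if_neg h1, if_neg h2, if_neg h3, if_neg h4, if_neg h5, if_pos h6, hmin]
                  rfl
                · have hnil : (w0 :: w1 :: rest).filterMap pvPriority = [] := by
                    rw [List.eq_nil_iff_forall_not_mem]
                    intro m hm'
                    obtain ⟨h7, hany⟩ := hits_mem_any (w0 :: w1 :: rest) m hm'
                    interval_cases m <;> first | exact absurd hany h0 | exact absurd hany h1 | exact absurd hany h2 | exact absurd hany h3 | exact absurd hany h4 | exact absurd hany h5 | exact absurd hany h6
                  have hmin : PySem.List.min? (([] : List Nat)) (fun x => x) = none :=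
                    by rw [PySem.List.min?_eq_none_iff]
                  rw [if_neg h0, if_neg h1, if_neg h2, if_neg h3, if_neg h4, if_neg h5, if_neg h6, hnil, hmin]
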